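-- pv_equiv track=rewrite | github.com/xtuml/erebus | test_harness/protocol_verifier/calc_pv_finish.py | calc_domain_end
-- ===== SOURCE A (Python) =====
-- def calc_domain_end(domain_coords: list[tuple[int, int]]) -> int:
--     """Method to calculate the end time of a domain
--
--     :param domain_coords: The coordinates of the domain to calculate end
--     time for
--     :type domain_coords: `list`[`tuple`[`int`, `int`]]
--     :return: Returns the end time for the domain
--     :rtype: `int`
--     """
--     end_time = domain_coords[-1][0]
--     for coord, coord_prev in zip(
--         domain_coords[-1:0:-1], domain_coords[-2::-1]
--     ):
--         difference = coord[1] - coord_prev[1]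
--         if difference != 0:
--             end_time = coord[0]
--             break
--     return end_time
-- ===== SOURCE B (Python) =====
-- def calc_domain_end(domain_coords: list[tuple[int, int]]) -> int:
--     """Single forward pass: collect the x-coordinate of every point whose
--     y differs from its predecessor; the end time is the last such x, or
--     the last point's x if the y-coordinate never changes."""
--     changes = [
--         cur[0]
--         for prev, cur in zip(domain_coords, domain_coords[1:])
--         if cur[1] != prev[1]
--     ]
--     return changes[-1] if changes else domain_coords[-1][0]
-- ===== Notes on version B (the rewrite author's own statement) =====
-- stated objective: alternative
-- what changed: A scans the adjacent pairs backwards (via two reversed slices) and breaks at the first y-change; B makes one forward pass that collects the x of every y-change into a list and returns its last element, falling back to the last point's x.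
import Mathlib
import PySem

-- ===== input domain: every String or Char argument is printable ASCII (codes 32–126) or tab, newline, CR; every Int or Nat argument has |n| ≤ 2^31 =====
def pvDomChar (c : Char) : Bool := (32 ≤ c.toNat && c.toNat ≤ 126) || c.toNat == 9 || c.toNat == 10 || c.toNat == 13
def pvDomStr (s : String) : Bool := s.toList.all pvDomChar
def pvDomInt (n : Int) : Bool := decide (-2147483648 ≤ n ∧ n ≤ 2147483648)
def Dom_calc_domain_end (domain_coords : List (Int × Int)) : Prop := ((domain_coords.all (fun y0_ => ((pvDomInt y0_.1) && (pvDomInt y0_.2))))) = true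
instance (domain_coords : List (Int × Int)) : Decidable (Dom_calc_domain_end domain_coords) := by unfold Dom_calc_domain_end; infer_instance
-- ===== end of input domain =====

-- B replaces A's backward early-exit scan by a forward pass that collects every change
-- point and returns the last one (objective: alternative decomposition, similar cost).


-- ===== PORT A =====
-- A's `for coord, coord_prev in zip(...): ... break` loop
def pvALoop : List ((Int × Int) × (Int × Int)) → Int → Int
  | [], end_time => end_time
  | (coord, coord_prev) :: rest, end_time =>
      if coord.2 - coord_prev.2 ≠ 0 then coord.1 else pvALoop rest end_time

def calc_domain_end (domain_coords : List (Int × Int)) : Int :=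
  -- domain_coords[-1] raises IndexError on []; those inputs are excluded by Pre_
  match PySem.List.pyGet? domain_coords (-1) with
  | none => 0
  | some last =>
      -- step -1 ≠ 0, so both slice? are `some`; the `.getD []` is never used
      pvALoop
        (((PySem.List.slice? domain_coords (some (-1)) (some 0) (-1)).getD []).zip
         ((PySem.List.slice? domain_coords (some (-2)) none (-1)).getD []))
        last.1

-- ===== PORT B =====
def calc_domain_end_alt (domain_coords : List (Int × Int)) : Int :=
  let changes :=
    ((domain_coords.zip (PySem.List.slice domain_coords (some 1) none)).filter
        (fun pc => pc.2.2 ≠ pc.1.2)).map (fun pc => pc.2.1)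
  -- changes[-1] if changes else domain_coords[-1][0] (IndexError on [] excluded by Pre_)
  match PySem.List.pyGet? changes (-1) with
  | some v => v
  | none => ((PySem.List.pyGet? domain_coords (-1)).getD (0, 0)).1

-- ===== PRECONDITION & SPEC =====
-- Pre_ excludes exactly the empty list, on which both A and B raise IndexError
def Pre_calc_domain_end (domain_coords : List (Int × Int)) : Prop := domain_coords ≠ []
instance (domain_coords : List (Int × Int)) : Decidable (Pre_calc_domain_end domain_coords) := by unfold Pre_calc_domain_end; infer_instance
def pvWitness_calc_domain_end : (List (Int × Int)) := [(0, 0)]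

def Spec_calc_domain_end (domain_coords : List (Int × Int)) (out : Int) : Prop := out = calc_domain_end_alt domain_coords
instance (domain_coords : List (Int × Int)) (out : Int) : Decidable (Spec_calc_domain_end domain_coords out) := by unfold Spec_calc_domain_end; infer_instance

-- ===== CLAIM (what is proved, stated in full; the proofs are below) =====
def Claim_equal_calc_domain_end : Prop := ∀ (domain_coords : List (Int × Int)), Dom_calc_domain_end domain_coords → Pre_calc_domain_end domain_coords → Spec_calc_domain_end domain_coords (calc_domain_end domain_coords)

-- ===== LEMMAS AND PROOFS =====

-- a descending-index filterMap over `range c` is a reversed contiguous segment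
theorem pv_revSeg {α : Type} (xs : List α) (t : Nat) (ht : t < xs.length) :
    ∀ c, c ≤ t + 1 →
      List.filterMap (fun k : Nat => xs[((t : Int) + -1 * (k : Int)).toNat]?) (List.range c)
        = ((xs.take (t + 1)).drop (t + 1 - c)).reverse := by
  intro c
  induction c with
  | zero =>
      intro _
      simp [List.drop_eq_nil_of_le, List.length_take]
  | succ c ih =>
      intro hc
      rw [List.range_succ, List.filterMap_append, ih (by omega)]
      have hidx : (((t : Int) + -1 * (c : Int)).toNat) = t - c := by omega
      have hlt : t - c < xs.length := by omega
      have htk : t - c < (xs.take (t + 1)).length := by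
        simp [List.length_take]; omega
      have h1 : t + 1 - (c + 1) = t - c := by omega
      have h2 : (t - c) + 1 = t + 1 - c := by omega
      rw [h1, List.drop_eq_getElem_cons htk, List.reverse_cons, h2]
      simp only [List.filterMap_cons, List.filterMap_nil, hidx,
        List.getElem?_eq_getElem hlt]
      simp [List.getElem_take]

-- xs[-1:0:-1] = reversed tail
theorem pv_slice1 {α : Type} (xs : List α) :
    PySem.List.slice? xs (some (-1)) (some 0) (-1) = some xs.tail.reverse := by
  cases xs with
  | nil => rfl
  | cons a rest =>
    unfold PySem.List.slice? PySem.List.sliceIndices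
    simp only [if_neg (by norm_num : ¬ ((-1 : Int) = 0)), if_pos (by norm_num : ((-1:Int) < 0)),
      if_neg (by norm_num : ¬ ((0 : Int) < -1)), if_neg (by norm_num : ¬ ((0 : Int) < 0)),
      List.length_cons]
    have hmax : max (-1 + (((rest.length + 1 : Nat)) : Int)) (-1) = (rest.length : Int) := by
      push_cast; omega
    have hmin : min (0 : Int) ((((rest.length + 1 : Nat)) : Int) - 1) = 0 := by
      push_cast; omega
    rw [hmax, hmin]
    have hcount : (if (0:Int) < (rest.length : Int) then
        (((rest.length : Int) - 0 + - -1 - 1) / - -1).toNat else 0) = rest.length := by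
      split_ifs with h
      · have : ((rest.length : Int) - 0 + - -1 - 1) = (rest.length : Int) := by ring
        rw [this]; simp
      · omega
    rw [hcount]
    rw [pv_revSeg (a :: rest) rest.length (by simp) rest.length (by omega)]
    simp

-- xs[-2::-1] = reversed dropLast
theorem pv_slice2 {α : Type} (xs : List α) :
    PySem.List.slice? xs (some (-2)) none (-1) = some xs.dropLast.reverse := by
  match xs with
  | [] => rfl
  | [a] => rfl
  | a :: b :: rest =>
    unfold PySem.List.slice? PySem.List.sliceIndices
    simp only [if_neg (by norm_num : ¬ ((-1 : Int) = 0)), if_pos (by norm_num : ((-1:Int) < 0)),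
      if_neg (by norm_num : ¬ ((0 : Int) < -1)), if_pos (by norm_num : ((-2 : Int) < 0)),
      List.length_cons]
    have hmax : max (-2 + (((rest.length + 1 + 1 : Nat)) : Int)) (-1) = (rest.length : Int) := by
      push_cast; omega
    rw [hmax]
    have hcount : (if (-1:Int) < (rest.length : Int) then
        (((rest.length : Int) - -1 + - -1 - 1) / - -1).toNat else 0) = rest.length + 1 := by
      split_ifs with h
      · have : ((rest.length : Int) - -1 + - -1 - 1) = (rest.length : Int) + 1 := by ring
        rw [this]; norm_num
      · omega
    rw [hcount]
    rw [pv_revSeg (a :: b :: rest) rest.length (by simp) (rest.length + 1) (by omega)]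
    simp [List.dropLast_eq_take]

-- A's break loop returns the first matching pair's x, else the initial end_time
theorem pv_aLoop_find (l : List ((Int × Int) × (Int × Int))) (e : Int) :
    pvALoop l e
      = ((l.find? (fun pc => pc.1.2 - pc.2.2 ≠ 0)).map (fun pc => pc.1.1)).getD e := by
  induction l with
  | nil => rfl
  | cons pc rest ih =>
      obtain ⟨c, p⟩ := pc
      by_cases h : c.2 - p.2 ≠ 0
      · simp [pvALoop, h, List.find?_cons_of_pos]
      · simp only [pvALoop, if_neg h, ih]
        rw [List.find?_cons_of_neg (by simpa using h)]

-- first match from the back = last match from the front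
theorem pv_find_reverse {β : Type} (l : List β) (p : β → Bool) :
    l.reverse.find? p = (l.filter p).getLast? := by
  induction l using List.reverseRecOn with
  | nil => rfl
  | append_singleton l a ih =>
      rw [List.reverse_append, List.filter_append]
      by_cases h : p a
      · simp [h, List.find?_cons_of_pos]
      · simp only [List.reverse_singleton, List.singleton_append]
        rw [List.find?_cons_of_neg (by simpa using h), ih]
        simp [h]

theorem pv_zip_append {β γ : Type} :
    ∀ (l1 : List β) (l2 l3 : List γ), l1.length ≤ l2.length → l1.zip (l2 ++ l3) = l1.zip l2
  | [], _, _, _ => by simp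
  | x :: t1, [], l3, h => by simp at h
  | x :: t1, y :: t2, l3, h => by
      simp only [List.cons_append, List.zip_cons_cons]
      rw [pv_zip_append t1 t2 l3 (by simpa using h)]

theorem pv_zip_reverse {β γ : Type} :
    ∀ (l1 : List β) (l2 : List γ), l1.length = l2.length →
      l1.reverse.zip l2.reverse = (l1.zip l2).reverse := by
  intro l1
  induction l1 with
  | nil => intro l2 h; simp
  | cons x t ih =>
      intro l2 h
      cases l2 with
      | nil => simp at h
      | cons y t2 =>
          simp only [List.reverse_cons, List.zip_cons_cons]
          rw [List.zip_append (by simp; simpa using h), ih t2 (by simpa using h)]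
          simp

theorem pv_main (xs : List (Int × Int)) (hpre : xs ≠ []) :
    calc_domain_end xs = calc_domain_end_alt xs := by
  have hlast : PySem.List.pyGet? xs (-1) = some (xs.getLast hpre) := by
    rw [PySem.List.pyGet?_neg_one, List.getLast?_eq_some_getLast hpre]
  have hlen : xs.tail.length = xs.dropLast.length := by
    simp [List.length_tail, List.length_dropLast]
  unfold calc_domain_end calc_domain_end_alt
  rw [hlast, pv_slice1, pv_slice2, PySem.List.slice_from_one]
  simp only [Option.getD_some]
  rw [pv_zip_reverse _ _ hlen, pv_aLoop_find, pv_find_reverse]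
  -- A's backward pair list is B's forward pair list, swapped
  have hzip : xs.tail.zip xs.dropLast = (xs.zip xs.tail).map Prod.swap := by
    have hx : xs.dropLast ++ [xs.getLast hpre] = xs := List.dropLast_append_getLast hpre
    have h1 := pv_zip_append xs.tail xs.dropLast [xs.getLast hpre] (le_of_eq hlen)
    rw [hx] at h1
    rw [← h1, List.zip_swap]
  rw [hzip, List.filter_map, List.getLast?_map]
  rw [PySem.List.pyGet?_neg_one, List.getLast?_map]
  have hpq : ((fun pc : (Int × Int) × (Int × Int) => decide (pc.1.2 - pc.2.2 ≠ 0)) ∘ Prod.swap)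
      = (fun pc : (Int × Int) × (Int × Int) => decide (pc.2.2 ≠ pc.1.2)) := by
    funext pc; simp [sub_ne_zero]
  rw [hpq]
  rcases hE : (List.filter (fun pc : (Int × Int) × (Int × Int) => decide (pc.2.2 ≠ pc.1.2)) (xs.zip xs.tail)).getLast? with _ | v
  · simp
  · simp

-- ===== VERDICT (by name: the statement is the Claim_ definition above) =====
theorem calc_domain_end_spec : Claim_equal_calc_domain_end := by
  intro domain_coords _ hpre
  unfold Spec_calc_domain_end
  exact pv_main domain_coords hpre
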